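-- pv_equiv track=rewrite | github.com/vadimvinokurov/log_viewer | src/log_viewer/core/command_parser.py | _extract_name
-- ===== SOURCE A (Python) =====
-- _FLAG_COMMANDS: set[str] = {
--     "s", "sr", "ss",
--     "f", "fr", "fs",
--     "h", "hr", "hs",
-- }
--
-- def _extract_name(s: str) -> tuple[str, str, bool]:
--     """Extract command name, remaining text, and whether '/' was the delimiter.
--
--     Space always separates name from text.
--     '/' only separates if the name is a flag-supporting command.
--     """
--     for i, ch in enumerate(s):
--         if ch == " ":
--             return s[:i], s[i + 1:], False
--         if ch == "/":
--             name = s[:i]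
--             if name in _FLAG_COMMANDS:
--                 return name, s[i + 1:], True
--     return s, "", False
-- ===== SOURCE B (Python) =====
-- _FLAG_COMMANDS = ("s", "sr", "ss", "f", "fr", "fs", "h", "hr", "hs")
--
--
-- def _extract_name(s: str) -> tuple[str, str, bool]:
--     """Extract command name, remaining text, and whether '/' was the delimiter.
--
--     Instead of scanning character by character, try each flag command as a
--     'cmd/' prefix (a slash split can only happen right after a flag command,
--     which always comes before any space); otherwise split at the first space.
--     """
--     for cmd in _FLAG_COMMANDS:
--         if s.startswith(cmd + "/"):
--             return cmd, s[len(cmd) + 1:], True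
--     sp = s.find(" ")
--     if sp == -1:
--         return s, "", False
--     return s[:sp], s[sp + 1:], False
-- ===== Notes on version B (the rewrite author's own statement) =====
-- stated objective: faster
-- what changed: Replaces the per-character enumerate scan by direct delimiter computation: try each flag command followed by a slash as a startswith prefix (a slash split can only occur right after a flag command, which always precedes any space), otherwise split at the first space located with str.find; the Python-level character loop disappears in favour of built-in string primitives.
import Mathlib
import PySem

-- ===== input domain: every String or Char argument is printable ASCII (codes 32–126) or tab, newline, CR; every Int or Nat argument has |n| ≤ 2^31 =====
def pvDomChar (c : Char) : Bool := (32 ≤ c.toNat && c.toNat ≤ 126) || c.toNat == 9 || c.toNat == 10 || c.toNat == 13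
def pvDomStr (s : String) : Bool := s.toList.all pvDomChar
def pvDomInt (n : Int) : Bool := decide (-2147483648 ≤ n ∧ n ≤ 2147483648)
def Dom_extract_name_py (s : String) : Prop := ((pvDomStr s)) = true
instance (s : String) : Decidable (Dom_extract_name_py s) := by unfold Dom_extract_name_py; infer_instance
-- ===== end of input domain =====

-- B replaces A's per-character scan by trying each flag command followed by a slash as a
-- startswith prefix and otherwise splitting at the first space via str.find (measured faster:
-- the Python-level character loop is replaced by built-in string primitives).

-- ===== PORT A =====
def pvFlags : PySem.Set String :=
  PySem.Set.ofList ["s", "sr", "ss", "f", "fr", "fs", "h", "hr", "hs"]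

def pvGoA (s : String) : List (Int × Char) → String × String × Bool
  | [] => (s, "", false)
  | (i, ch) :: rest =>
    if ch = ' ' then
      (PySem.Str.slice s none (some i), PySem.Str.slice s (some (i + 1)) none, false)
    else if ch = '/' then
      let name := PySem.Str.slice s none (some i)
      if PySem.Set.contains pvFlags name then
        (name, PySem.Str.slice s (some (i + 1)) none, true)
      else pvGoA s rest
    else pvGoA s rest

def extract_name_py (s : String) : String × String × Bool :=
  pvGoA s (PySem.List.enumerate s.toList 0)

-- ===== PORT B =====
def pvFlagList : List String := ["s", "sr", "ss", "f", "fr", "fs", "h", "hr", "hs"]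

def pvFindFlag (s : String) : List String → Option String
  | [] => none
  | cmd :: rest =>
    if PySem.Str.startswith s (cmd ++ "/") then some cmd else pvFindFlag s rest

def extract_name_py_alt (s : String) : String × String × Bool :=
  match pvFindFlag s pvFlagList with
  | some cmd => (cmd, PySem.Str.slice s (some (PySem.Str.len cmd + 1)) none, true)
  | none =>
    let sp := PySem.Str.find s " "
    if sp = -1 then (s, "", false)
    else (PySem.Str.slice s none (some sp), PySem.Str.slice s (some (sp + 1)) none, false)

-- ===== PRECONDITION & SPEC =====
def Spec_extract_name_py (s : String) (out : String × String × Bool) : Prop := out = extract_name_py_alt s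
instance (s : String) (out : String × String × Bool) : Decidable (Spec_extract_name_py s out) := by unfold Spec_extract_name_py; infer_instance

-- ===== CLAIM (what is proved, stated in full; the proofs are below) =====
def Claim_equal_extract_name_py : Prop := ∀ (s : String), Dom_extract_name_py s → Spec_extract_name_py s (extract_name_py s)

-- ===== LEMMAS AND PROOFS =====

-- [c] is a prefix of m iff m starts with c
lemma pv_singleton_prefix {c : Char} {m : List Char} : [c] <+: m ↔ m[0]? = some c := by
  constructor
  · rintro ⟨t, ht⟩; subst ht; rfl
  · intro h
    cases m with
    | nil => simp at h
    | cons a t => simp_all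

-- two distinct flags cannot both be 'cmd/'-prefixes of the same string
lemma pv_uniq {cs : List Char} {a b : String} (ha : a ∈ pvFlagList) (hb : b ∈ pvFlagList)
    (hpa : (a ++ "/").toList <+: cs) (hpb : (b ++ "/").toList <+: cs) : a = b := by
  have key : ∀ x ∈ pvFlagList, ∀ y ∈ pvFlagList,
      ((x ++ "/").toList <+: (y ++ "/").toList → x = y) := by decide
  rcases List.prefix_or_prefix_of_prefix hpa hpb with h | h
  · exact key a ha b hb h
  · exact (key b hb a ha h).symm

lemma pv_findFlag_none (s : String) :
    ∀ L : List String, (∀ cmd ∈ L, PySem.Str.startswith s (cmd ++ "/") = false) →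
      pvFindFlag s L = none := by
  intro L
  induction L with
  | nil => intro _; rfl
  | cons c t ih =>
    intro h
    simp only [pvFindFlag, h c (by simp)]
    simp only [Bool.false_eq_true, if_false]
    exact ih fun cmd hm => h cmd (by simp [hm])

lemma pv_findFlag_some (s : String) (name : String) :
    ∀ L : List String, name ∈ L →
      PySem.Str.startswith s (name ++ "/") = true →
      (∀ a ∈ L, PySem.Str.startswith s (a ++ "/") = true → a = name) →
      pvFindFlag s L = some name := by
  intro L
  induction L with
  | nil => simp
  | cons c t ih =>
    intro hmem hsw huniq
    by_cases hc : PySem.Str.startswith s (c ++ "/") = true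
    · have hcn : c = name := huniq c (by simp) hc
      subst hcn
      simp only [pvFindFlag, if_pos hc]
    · simp only [pvFindFlag, hc]
      simp only [Bool.false_eq_true, if_false]
      rcases List.mem_cons.mp hmem with h | h
      · exact absurd (h ▸ hsw) hc
      · exact ih h hsw fun a ha => huniq a (by simp [ha])

-- startswith (cmd ++ "/") unfolded to facts about s.toList
lemma pv_startswith_iff (s cmd : String) :
    PySem.Str.startswith s (cmd ++ "/") = true ↔ cmd.toList ++ ['/'] <+: s.toList := by
  rw [PySem.Str.startswith_eq, PySem.Chars.startswith_iff]
  simp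

-- the slice s[:i] as a list, for a natural bound
lemma pv_slice_toList (s : String) (i : Nat) :
    (PySem.Str.slice s none (some (i : Int))).toList = s.toList.take i := by
  rw [PySem.Str.toList_slice, PySem.Chars.slice_eq_listSlice, PySem.List.slice_to_natCast]

-- every flag command, with '/', contains no space
set_option maxRecDepth 2000 in
lemma pv_flag_no_space' : ∀ cmd ∈ pvFlagList, ((cmd ++ "/").toList).all (· ≠ ' ') = true := by decide

lemma pv_flag_no_space : ∀ cmd ∈ pvFlagList, ∀ c ∈ cmd.toList ++ ['/'], c ≠ ' ' := by
  intro cmd hm c hc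
  have := pv_flag_no_space' cmd hm
  rw [List.all_eq_true] at this
  exact of_decide_eq_true (this c (by simpa using hc))

lemma pv_flag_contains : ∀ cmd ∈ pvFlagList, PySem.Set.contains pvFlags cmd = true := by decide

lemma pv_contains_mem {x : String} (h : PySem.Set.contains pvFlags x = true) : x ∈ pvFlagList := by
  have hx : x ∈ pvFlags := (PySem.Set.contains_iff pvFlags x).mp h
  have : pvFlags = pvFlagList := by decide
  rw [this] at hx; exact hx

-- from a 'cmd/' prefix: position cmd.length holds '/', prefix below it is cmd
lemma pv_prefix_facts {s cmd : String} (h : cmd.toList ++ ['/'] <+: s.toList) :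
    s.toList[cmd.toList.length]? = some '/' ∧ s.toList.take cmd.toList.length = cmd.toList := by
  obtain ⟨t, ht⟩ := h
  constructor
  · rw [← ht]; simp
  · rw [← ht]; simp

-- no flag command can match when a space (or the end) would be hit first
lemma pv_no_flag (s : String) (i : Nat)
    (hinv2 : ∀ j, j < i → s.toList[j]? = some '/' →
      PySem.Set.contains pvFlags (PySem.Str.slice s none (some (j : Int))) = false)
    (hi : s.toList[i]? = some ' ' ∨ s.toList.length ≤ i) :
    pvFindFlag s pvFlagList = none := by
  apply pv_findFlag_none
  intro cmd hm
  by_contra hsw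
  rw [Bool.not_eq_false] at hsw
  have hpre : cmd.toList ++ ['/'] <+: s.toList := (pv_startswith_iff s cmd).mp hsw
  obtain ⟨hslash, htake⟩ := pv_prefix_facts hpre
  set n := cmd.toList.length with hn
  have hnlt : n < s.toList.length := (List.getElem?_eq_some_iff.mp hslash).1
  by_cases hni : n < i
  · -- the scan rejected this slash position
    have hfalse := hinv2 n hni hslash
    have hsl : (PySem.Str.slice s none (some (n : Int))) = cmd := by
      rw [← String.toList_inj, pv_slice_toList, htake]
    rw [hsl, pv_flag_contains cmd hm] at hfalse
    exact absurd hfalse (by simp)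
  · -- the prefix reaches past position i, but it contains no space
    rcases hi with hsp | hlen
    · have hile : i < n + 1 := by omega
      have heq : cmd.toList ++ ['/'] = s.toList.take (n + 1) := by
        have := List.prefix_iff_eq_take.mp hpre
        simpa using this
      have hmem : ' ' ∈ cmd.toList ++ ['/'] := by
        rw [List.mem_iff_getElem?]
        refine ⟨i, ?_⟩
        rw [heq]
        simpa [List.getElem?_take, hile] using hsp
      exact pv_flag_no_space cmd hm ' ' hmem rfl
    · exact absurd hslash (by rw [List.getElem?_eq_none (by omega)]; simp)

-- s.find(" ") returns the first space position
lemma pv_find_space (s : String) (i : Nat) (hsp : s.toList[i]? = some ' ')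
    (hmin : ∀ j, j < i → s.toList[j]? ≠ some ' ') : PySem.Str.find s " " = (i : Int) := by
  have hmem : ' ' ∈ s.toList := List.mem_iff_getElem?.mpr ⟨i, hsp⟩
  have hinf : (" ".toList) <:+: s.toList := by
    simpa using (List.singleton_infix_iff ' ' s.toList).mpr hmem
  have hnn : 0 ≤ PySem.Str.find s " " := (PySem.Str.find_nonneg_iff s " ").mpr hinf
  have hspec := PySem.Chars.find_spec (s := s.toList) (sub := " ".toList) (by
    rw [PySem.Str.find_eq] at hnn; exact hnn)
  rw [PySem.Str.find_eq]
  set t := (PySem.Chars.find s.toList " ".toList).toNat with ht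
  have htsp : s.toList[t]? = some ' ' := by
    have h1 := hspec.1
    have : (" ".toList) <+: s.toList.drop t := h1
    have h2 : (s.toList.drop t)[0]? = some ' ' := by
      have : [' '] <+: s.toList.drop t := by simpa using this
      exact pv_singleton_prefix.mp this
    simpa [List.getElem?_drop] using h2
  have hti : t = i := by
    rcases lt_trichotomy t i with h | h | h
    · exact absurd htsp (hmin t h)
    · exact h
    · exfalso
      apply hspec.2 i h
      simpa using pv_singleton_prefix.mpr (by simpa [List.getElem?_drop] using hsp)
  rw [PySem.Str.find_eq] at hnn
  omega

-- B's result when the scan hits a flag slash at position i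
lemma pv_alt_flag (s : String) (i : Nat) (name : String)
    (htake : s.toList.take i = name.toList) (hslash : s.toList[i]? = some '/')
    (hc : PySem.Set.contains pvFlags name = true) :
    extract_name_py_alt s = (name, PySem.Str.slice s (some ((i : Int) + 1)) none, true) := by
  have hmem : name ∈ pvFlagList := pv_contains_mem hc
  have hi_lt : i < s.toList.length := (List.getElem?_eq_some_iff.mp hslash).1
  have hlen : name.toList.length = i := by
    rw [← htake, List.length_take]; omega
  have hpre : name.toList ++ ['/'] <+: s.toList := by
    rw [List.prefix_iff_eq_take]
    have : s.toList.take (i + 1) = s.toList.take i ++ [' '].map (fun _ => '/') := by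
      rw [List.take_add_one]
      simp [hslash]
    simp only [List.length_append, hlen, List.length_singleton]
    rw [this, htake]
    simp
  have hsw : PySem.Str.startswith s (name ++ "/") = true := (pv_startswith_iff s name).mpr hpre
  have huniq : ∀ a ∈ pvFlagList, PySem.Str.startswith s (a ++ "/") = true → a = name := by
    intro a ha hswa
    exact pv_uniq ha hmem (by simpa using (pv_startswith_iff s a).mp hswa)
      (by simpa using hpre)
  have hff : pvFindFlag s pvFlagList = some name := pv_findFlag_some s name pvFlagList hmem hsw huniq
  simp only [extract_name_py_alt, hff, PySem.Str.len_eq, hlen]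

-- main loop invariant lemma
lemma pv_main (s : String) :
    ∀ (rest : List Char) (i : Nat),
      s.toList.drop i = rest →
      (∀ j, j < i → s.toList[j]? ≠ some ' ') →
      (∀ j, j < i → s.toList[j]? = some '/' →
        PySem.Set.contains pvFlags (PySem.Str.slice s none (some (j : Int))) = false) →
      pvGoA s (PySem.List.enumerate rest (i : Int)) = extract_name_py_alt s := by
  intro rest
  induction rest with
  | nil =>
    intro i h1 h2 h3
    have hlen : s.toList.length ≤ i := List.drop_eq_nil_iff.mp h1
    have hff : pvFindFlag s pvFlagList = none := pv_no_flag s i h3 (Or.inr hlen)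
    have hfind : PySem.Str.find s " " = -1 := by
      rw [PySem.Str.find_eq, PySem.Chars.find_eq_neg_one_iff]
      intro hinf
      have : ' ' ∈ s.toList := (List.singleton_infix_iff ' ' s.toList).mp (by simpa using hinf)
      obtain ⟨j, hj⟩ := List.mem_iff_getElem?.mp this
      have hjl : j < s.toList.length := (List.getElem?_eq_some_iff.mp hj).1
      exact h2 j (by omega) hj
    have hfindc : PySem.Chars.find s.toList [' '] = -1 := by
      rwa [PySem.Str.find_eq, show (" ".toList) = [' '] from rfl] at hfind
    simp [PySem.List.enumerate_nil, pvGoA, extract_name_py_alt, hff, hfindc]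
  | cons ch rest' ih =>
    intro i h1 h2 h3
    have hch : s.toList[i]? = some ch := by
      have := congrArg (fun l => l[0]?) h1
      simpa [List.getElem?_drop] using this
    have hrest' : s.toList.drop (i + 1) = rest' := by
      have := congrArg List.tail h1
      simpa [List.tail_drop] using this
    rw [PySem.List.enumerate_cons]
    by_cases hsp : ch = ' '
    · subst hsp
      have hff : pvFindFlag s pvFlagList = none := pv_no_flag s i h3 (Or.inl hch)
      have hfind : PySem.Str.find s " " = (i : Int) := pv_find_space s i hch h2
      have hne : ¬ ((i : Int) = -1) := by omega
      have hfindc : PySem.Chars.find s.toList [' '] = (i : Int) := by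
        have h := hfind
        rwa [PySem.Str.find_eq, show (" ".toList) = [' '] from rfl] at h
      simp [pvGoA, extract_name_py_alt, hff, hfindc, hne]
    · by_cases hsl : ch = '/'
      · subst hsl
        simp only [pvGoA, if_neg (by simp : ¬ ('/' = ' '))]
        by_cases hc : PySem.Set.contains pvFlags (PySem.Str.slice s none (some (i : Int))) = true
        · rw [pv_alt_flag s i (PySem.Str.slice s none (some (i : Int)))
            (pv_slice_toList s i).symm hch hc]
          rw [if_pos hc]
          exact if_pos trivial
        · rw [if_neg hc]
          have : ((i : Int) + 1) = ((i + 1 : Nat) : Int) := by push_cast; ring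
          rw [this]
          apply ih (i + 1) hrest'
          · intro j hj
            rcases Nat.lt_or_ge j i with h | h
            · exact h2 j h
            · have : j = i := by omega
              subst this
              rw [hch]; simp
          · intro j hj hsj
            rcases Nat.lt_or_ge j i with h | h
            · exact h3 j h hsj
            · have : j = i := by omega
              subst this
              simpa using hc
      · simp only [pvGoA, if_neg (by simpa using hsp), if_neg (by simpa using hsl)]
        have : ((i : Int) + 1) = ((i + 1 : Nat) : Int) := by push_cast; ring
        rw [this]
        apply ih (i + 1) hrest'
        · intro j hj
          rcases Nat.lt_or_ge j i with h | h
          · exact h2 j h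
          · have : j = i := by omega
            subst this
            rw [hch]
            simp
            intro he
            exact hsp he
        · intro j hj hsj
          rcases Nat.lt_or_ge j i with h | h
          · exact h3 j h hsj
          · have : j = i := by omega
            subst this
            rw [hch] at hsj
            exact absurd (Option.some.inj hsj) hsl

-- ===== VERDICT (by name: the statement is the Claim_ definition above) =====
theorem extract_name_py_spec : Claim_equal_extract_name_py := by
  intro s _
  unfold Spec_extract_name_py extract_name_py
  have := pv_main s s.toList 0 (by simp) (by omega) (by omega)
  simpa using this
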